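-- pv_equiv track=rewrite | github.com/wflyerthariani/FoldFlow | helper/reformat_fixed_residues.py | generate_fixed_positions
-- ===== SOURCE A (Python) =====
-- from collections import defaultdict
--
-- def generate_fixed_positions(con_hal_pdb_idx):
--     """
--     Reformat trb fixed residues for use in MPNN
--
--     Args:
--         con_hal_pdb_idx: List of (chain_id, residue_number) tuples
--
--     Returns:
--         chains_to_design: str, e.g. "A B"
--         fixed_positions: str, e.g. "101 102 103, 210 211"
--     """
--
--     chain_to_residues = defaultdict(list)
--     for chain_id, res_num in con_hal_pdb_idx:
--         chain_to_residues[chain_id].append(res_num)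
--
--     # Sort residues per chain
--     for chain_id in chain_to_residues:
--         chain_to_residues[chain_id].sort()
--
--     chains_to_design = []
--     fixed_positions_parts = []
--
--     for chain_id in sorted(chain_to_residues.keys()):
--         residues = chain_to_residues[chain_id]
--         chains_to_design.append(chain_id)
--
--         # Use original residue numbers, space-separated
--         fixed_positions_parts.append(" ".join(str(r) for r in residues))
--
--     chains_to_design_str = " ".join(chains_to_design)
--     fixed_positions_str = ", ".join(fixed_positions_parts)
--
--     return chains_to_design_str, fixed_positions_str
-- ===== SOURCE B (Python) =====
-- def generate_fixed_positions(con_hal_pdb_idx):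
--     """
--     Reformat trb fixed residues for use in MPNN.
--
--     Single global sort (chain, then residue) followed by one linear pass over
--     consecutive same-chain runs; no dict, no per-chain sorts, no key sort.
--     """
--     chains = []
--     parts = []
--     for chain_id, res in sorted(con_hal_pdb_idx):
--         if chains and chains[-1] == chain_id:
--             parts[-1] = parts[-1] + " " + str(res)
--         else:
--             chains.append(chain_id)
--             parts.append(str(res))
--     return " ".join(chains), ", ".join(parts)
-- ===== Notes on version B (the rewrite author's own statement) =====
-- stated objective: simpler
-- what changed: One global sort of the (chain, residue) pairs followed by a single linear pass over consecutive same-chain runs replaces the defaultdict grouping, the per-chain sorts and the separate sort of the keys.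
import Mathlib
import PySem

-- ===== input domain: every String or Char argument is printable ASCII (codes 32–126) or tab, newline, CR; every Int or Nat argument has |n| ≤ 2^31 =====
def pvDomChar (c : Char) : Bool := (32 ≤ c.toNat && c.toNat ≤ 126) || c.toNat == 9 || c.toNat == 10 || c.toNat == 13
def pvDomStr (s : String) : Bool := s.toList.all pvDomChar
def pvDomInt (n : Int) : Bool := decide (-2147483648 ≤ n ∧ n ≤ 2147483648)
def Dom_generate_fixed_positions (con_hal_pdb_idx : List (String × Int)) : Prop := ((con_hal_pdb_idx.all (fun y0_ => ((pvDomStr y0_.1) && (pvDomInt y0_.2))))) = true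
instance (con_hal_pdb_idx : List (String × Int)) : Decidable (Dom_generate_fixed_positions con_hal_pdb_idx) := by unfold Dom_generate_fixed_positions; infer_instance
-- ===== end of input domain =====

-- B: one global sort of the pairs + a single linear pass over consecutive same-chain
-- runs replaces A's defaultdict grouping, per-chain sorts and key sort (objective: simpler).

-- ===== PORT A =====
def generate_fixed_positions (con_hal_pdb_idx : List (String × Int)) : String × String :=
  -- chain_to_residues = defaultdict(list); for chain_id, res_num in ...: append
  let chain_to_residues : PySem.Dict String (List Int) :=
    con_hal_pdb_idx.foldl (fun d p => d.modify p.1 [] (fun rs => rs ++ [p.2])) PySem.Dict.empty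
  -- for chain_id in chain_to_residues: chain_to_residues[chain_id].sort()
  let chain_to_residues2 : PySem.Dict String (List Int) :=
    chain_to_residues.keys.foldl
      (fun d c => d.modify c [] (fun rs => PySem.List.sorted rs (fun r => r))) chain_to_residues
  -- for chain_id in sorted(keys): append chain_id; append " ".join(str(r) for r in residues)
  let st : List String × List String :=
    (PySem.List.sorted chain_to_residues2.keys (fun k => k)).foldl
      (fun st c =>
        (st.1 ++ [c],
         st.2 ++ [PySem.Str.join " " ((chain_to_residues2.getD c []).map PySem.Int.toStr)]))
      ([], [])
  (PySem.Str.join " " st.1, PySem.Str.join ", " st.2)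

-- ===== PORT B =====
-- loop body of Source B; the two accumulator lists are kept head-first (Python appends to /
-- updates the END of chains and parts, so chains = st.1.reverse, parts = st.2.reverse)
def gfpStep (st : List String × List String) (p : String × Int) : List String × List String :=
  match st with
  | (c :: cs, q :: qs) =>
    if c = p.1 then (c :: cs, (q ++ " " ++ PySem.Int.toStr p.2) :: qs)   -- parts[-1] += " " + str(res)
    else (p.1 :: c :: cs, PySem.Int.toStr p.2 :: q :: qs)
  | _ => ([p.1], [PySem.Int.toStr p.2])

def generate_fixed_positions_alt (con_hal_pdb_idx : List (String × Int)) : String × String :=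
  let st := (PySem.List.sorted2 con_hal_pdb_idx (fun p => p.1) (fun p => p.2)).foldl gfpStep ([], [])
  (PySem.Str.join " " st.1.reverse, PySem.Str.join ", " st.2.reverse)

-- ===== PRECONDITION & SPEC =====
def Spec_generate_fixed_positions (con_hal_pdb_idx : List (String × Int)) (out : String × String) : Prop := out = generate_fixed_positions_alt con_hal_pdb_idx
instance (con_hal_pdb_idx : List (String × Int)) (out : String × String) : Decidable (Spec_generate_fixed_positions con_hal_pdb_idx out) := by unfold Spec_generate_fixed_positions; infer_instance

-- ===== CLAIM (what is proved, stated in full; the proofs are below) =====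
def Claim_equal_generate_fixed_positions : Prop := ∀ (con_hal_pdb_idx : List (String × Int)), Dom_generate_fixed_positions con_hal_pdb_idx → Spec_generate_fixed_positions con_hal_pdb_idx (generate_fixed_positions con_hal_pdb_idx)

-- ===== LEMMAS AND PROOFS =====

-- the sorted distinct chains, per-chain residues, and formatted part of one chain
def gfpChains (l : List (String × Int)) : List String :=
  PySem.List.sorted (PySem.Set.ofList (l.map Prod.fst)) (fun k => k)
def gfpRes (l : List (String × Int)) (c : String) : List Int :=
  PySem.List.sorted ((l.filter (fun p => p.1 == c)).map Prod.snd) (fun r => r)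
def gfpPart (l : List (String × Int)) (c : String) : String :=
  PySem.Str.join " " ((gfpRes l c).map PySem.Int.toStr)

-- the common normal form both programs are reduced to
def gfpCanon (l : List (String × Int)) : String × String :=
  (PySem.Str.join " " (gfpChains l), PySem.Str.join ", " ((gfpChains l).map (gfpPart l)))

-- lexicographic order on the pairs (Python's tuple order)
def Lexle (a b : String × Int) : Prop := a.1 < b.1 ∨ (a.1 = b.1 ∧ a.2 ≤ b.2)

def gfpBf (a b : String × Int) : Bool :=
  decide (a.1 < b.1) || (!decide (b.1 < a.1) && decide (a.2 < b.2))

theorem gfpBf_false_iff (a b : String × Int) : gfpBf a b = false ↔ Lexle b a := by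
  unfold gfpBf Lexle
  rcases lt_trichotomy a.1 b.1 with h | h | h
  · simp [h, not_lt.mpr h.le, ne_of_gt h]
  · simp [h]
  · simp [h, not_lt.mpr h.le, h.ne]

theorem gfpBf_true_lexle (a b : String × Int) (h : gfpBf a b = true) : Lexle a b := by
  unfold gfpBf at h
  unfold Lexle
  rcases lt_trichotomy a.1 b.1 with h1 | h1 | h1
  · exact Or.inl h1
  · simp [h1] at h
    exact Or.inr ⟨h1, le_of_lt h⟩
  · simp [not_lt.mpr h1.le, h1] at h

theorem Lexle_trans {a b c : String × Int} : Lexle a b → Lexle b c → Lexle a c := by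
  unfold Lexle
  rintro (h1 | ⟨h1, h1'⟩) (h2 | ⟨h2, h2'⟩)
  · exact Or.inl (h1.trans h2)
  · exact Or.inl (h2 ▸ h1)
  · exact Or.inl (h1 ▸ h2)
  · exact Or.inr ⟨h1.trans h2, h1'.trans h2'⟩

theorem Lexle_antisymm {a b : String × Int} : Lexle a b → Lexle b a → a = b := by
  unfold Lexle
  rintro (h1 | ⟨h1, h1'⟩) (h2 | ⟨h2, h2'⟩)
  · exact absurd h2 h1.asymm
  · exact absurd h1 (h2 ▸ lt_irrefl _)
  · exact absurd h2 (h1 ▸ lt_irrefl _)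
  · exact Prod.ext h1 (le_antisymm h1' h2')

theorem insertBy_cons {α : Type} (bf : α → α → Bool) (x y : α) (ys : List α) :
    PySem.List.insertBy bf x (y :: ys) =
      if bf x y then x :: y :: ys else y :: PySem.List.insertBy bf x ys := rfl

theorem insertBy_pairwise (x : String × Int) (acc : List (String × Int))
    (h : acc.Pairwise Lexle) : (PySem.List.insertBy gfpBf x acc).Pairwise Lexle := by
  induction acc with
  | nil => simp [PySem.List.insertBy]
  | cons y ys ih =>
    rw [List.pairwise_cons] at h
    obtain ⟨hy, hys⟩ := h
    rw [insertBy_cons]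
    by_cases hb : gfpBf x y = true
    · rw [if_pos hb]
      refine List.pairwise_cons.mpr ⟨?_, List.pairwise_cons.mpr ⟨hy, hys⟩⟩
      intro z hz
      rcases List.mem_cons.mp hz with rfl | hz
      · exact gfpBf_true_lexle _ _ hb
      · exact Lexle_trans (gfpBf_true_lexle _ _ hb) (hy _ hz)
    · rw [if_neg hb]
      refine List.pairwise_cons.mpr ⟨?_, ih hys⟩
      intro z hz
      rcases (PySem.List.mem_insertBy _ _ _ _).mp hz with rfl | hz
      · exact (gfpBf_false_iff _ _).mp (Bool.not_eq_true _ ▸ hb)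
      · exact hy _ hz

theorem foldl_insertBy_pairwise (l acc : List (String × Int))
    (h : acc.Pairwise Lexle) :
    (l.foldl (fun acc x => PySem.List.insertBy gfpBf x acc) acc).Pairwise Lexle := by
  induction l generalizing acc with
  | nil => exact h
  | cons p l ih => exact ih _ (insertBy_pairwise _ _ h)

theorem sorted2_pairwise (l : List (String × Int)) :
    (PySem.List.sorted2 l (fun p => p.1) (fun p => p.2)).Pairwise Lexle := by
  have : PySem.List.sorted2 l (fun p => p.1) (fun p => p.2) =
      l.foldl (fun acc x => PySem.List.insertBy gfpBf x acc) [] := rfl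
  rw [this]
  exact foldl_insertBy_pairwise l [] List.Pairwise.nil

-- the canonical rearrangement: chains in sorted order, each chain's residues sorted
def gfpFlat (l : List (String × Int)) : List (String × Int) :=
  (gfpChains l).flatMap (fun c => (gfpRes l c).map (fun r => (c, r)))

theorem mem_gfpChains (l : List (String × Int)) (c : String) :
    c ∈ gfpChains l ↔ c ∈ l.map Prod.fst := by
  unfold gfpChains
  rw [PySem.List.mem_sorted]
  exact PySem.Set.mem_ofList _ _

theorem nodup_gfpChains (l : List (String × Int)) : (gfpChains l).Nodup := by
  unfold gfpChains
  exact ((PySem.List.sorted_perm _ _ _).nodup_iff).mpr (PySem.Set.nodup_ofList _)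

theorem block_perm_filter (l : List (String × Int)) (c : String) :
    ((gfpRes l c).map (fun r => (c, r))).Perm (l.filter (fun p => p.1 == c)) := by
  unfold gfpRes
  calc ((PySem.List.sorted ((l.filter (fun p => p.1 == c)).map Prod.snd) (fun r => r)).map
          (fun r => (c, r))).Perm
        (((l.filter (fun p => p.1 == c)).map Prod.snd).map (fun r => (c, r))) :=
      (PySem.List.sorted_perm _ _ _).map _
    _ = l.filter (fun p => p.1 == c) := by
      rw [List.map_map]
      have : ∀ p ∈ l.filter (fun p => p.1 == c), ((fun r => (c, r)) ∘ Prod.snd) p = id p := by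
        intro p hp
        have := List.of_mem_filter hp
        simp only [beq_iff_eq] at this
        simp [Function.comp, ← this]
      rw [List.map_congr_left this, List.map_id]

theorem flatMap_filter_perm (cs : List String) (l : List (String × Int))
    (hnd : cs.Nodup) (hcov : ∀ p ∈ l, p.1 ∈ cs) :
    (cs.flatMap (fun c => l.filter (fun p => p.1 == c))).Perm l := by
  induction cs generalizing l with
  | nil =>
    cases l with
    | nil => simp
    | cons p t => exact absurd (hcov p (List.mem_cons_self)) (List.not_mem_nil)
  | cons c cs ih =>
    rw [List.flatMap_cons]
    rw [List.nodup_cons] at hnd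
    have hrest : cs.flatMap (fun c' => l.filter (fun p => p.1 == c')) =
        cs.flatMap (fun c' => (l.filter (fun p => !(p.1 == c))).filter (fun p => p.1 == c')) := by
      apply List.flatMap_congr
      intro c' hc'
      rw [List.filter_filter]
      apply List.filter_congr
      intro p _
      by_cases hpc : p.1 == c'
      · have hne : ¬ (p.1 == c) = true := by
          simp only [beq_iff_eq] at hpc ⊢
          rw [hpc]
          intro hcc
          exact hnd.1 (hcc ▸ hc')
        simp [hpc, hne]
      · simp [hpc]
    rw [hrest]
    have hcov' : ∀ p ∈ l.filter (fun p => !(p.1 == c)), p.1 ∈ cs := by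
      intro p hp
      have hm := List.mem_of_mem_filter hp
      have hne := List.of_mem_filter hp
      simp only [Bool.not_eq_true', beq_eq_false_iff_ne, ne_eq] at hne
      rcases List.mem_cons.mp (hcov p hm) with h | h
      · exact absurd h hne
      · exact h
    exact ((ih _ hnd.2 hcov').append_left _).trans (List.filter_append_perm _ l)

theorem gfpFlat_perm (l : List (String × Int)) : (gfpFlat l).Perm l := by
  unfold gfpFlat
  have h1 : ((gfpChains l).flatMap (fun c => (gfpRes l c).map (fun r => (c, r)))).Perm
      ((gfpChains l).flatMap (fun c => l.filter (fun p => p.1 == c))) := by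
    apply List.Perm.flatMap_left
    intro c _
    exact block_perm_filter l c
  have h2 := flatMap_filter_perm (gfpChains l) l (nodup_gfpChains l)
    (fun p hp => (mem_gfpChains l p.1).mpr (List.mem_map_of_mem hp))
  exact h1.trans h2

theorem flatMap_blocks_pairwise (l : List (String × Int)) (cs : List String)
    (h : cs.Pairwise (· < ·)) :
    (cs.flatMap (fun c => (gfpRes l c).map (fun r => (c, r)))).Pairwise Lexle := by
  induction cs with
  | nil => simp
  | cons c cs ih =>
    rw [List.pairwise_cons] at h
    rw [List.flatMap_cons, List.pairwise_append]
    refine ⟨?_, ih h.2, ?_⟩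
    · rw [List.pairwise_map]
      refine List.Pairwise.imp ?_ (PySem.List.sorted_pairwise ((l.filter (fun p => p.1 == c)).map Prod.snd) (fun r => r))
      intro r1 r2 hr
      exact Or.inr ⟨rfl, hr⟩
    · intro x hx y hy
      rcases List.mem_map.mp hx with ⟨r, _, rfl⟩
      rcases List.mem_flatMap.mp hy with ⟨c', hc', hy'⟩
      rcases List.mem_map.mp hy' with ⟨r', _, rfl⟩
      exact Or.inl (h.1 c' hc')

theorem gfpFlat_pairwise (l : List (String × Int)) : (gfpFlat l).Pairwise Lexle := by
  unfold gfpFlat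
  exact flatMap_blocks_pairwise l _ (PySem.List.sorted_ofList_pairwise_lt _)

theorem sorted2_eq_gfpFlat (l : List (String × Int)) :
    PySem.List.sorted2 l (fun p => p.1) (fun p => p.2) = gfpFlat l := by
  exact List.Perm.eq_of_pairwise (fun _ _ _ _ => Lexle_antisymm)
    (sorted2_pairwise l) (gfpFlat_pairwise l)
    ((PySem.List.sorted2_perm l _ _ false).trans (gfpFlat_perm l).symm)

-- ===== A reduces to the normal form =====

theorem dict_getD (l : List (String × Int)) (c : String) :
    (l.foldl (fun d p => d.modify p.1 [] (fun rs => rs ++ [p.2])) PySem.Dict.empty).getD c []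
      = (l.filter (fun p => p.1 == c)).map Prod.snd := by
  rw [PySem.Dict.getD_foldl_modify_append]
  simp [PySem.Dict.getD_empty]

theorem dict_keys (l : List (String × Int)) :
    (l.foldl (fun d p => d.modify p.1 [] (fun rs => rs ++ [p.2])) PySem.Dict.empty).keys
      = PySem.Set.ofList (l.map Prod.fst) := by
  rw [PySem.Dict.keys_foldl_modify_key l (fun p => p.1) [] (fun _ p rs => rs ++ [p.2])]
  rfl

theorem fold_sort_getD_not_mem (ks : List String) (d : PySem.Dict String (List Int))
    (c : String) (h : c ∉ ks) :
    (ks.foldl (fun d c' => d.modify c' [] (fun rs => PySem.List.sorted rs (fun r => r))) d).getD c []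
      = d.getD c [] := by
  induction ks generalizing d with
  | nil => rfl
  | cons k ks ih =>
    rw [List.foldl_cons, ih _ (fun hm => h (List.mem_cons_of_mem _ hm)),
      PySem.Dict.getD_modify_of_ne _ _ _ (by rintro rfl; exact h List.mem_cons_self)]

theorem fold_sort_getD_mem (ks : List String) (d : PySem.Dict String (List Int))
    (c : String) (hnd : ks.Nodup) (h : c ∈ ks) :
    (ks.foldl (fun d c' => d.modify c' [] (fun rs => PySem.List.sorted rs (fun r => r))) d).getD c []
      = PySem.List.sorted (d.getD c []) (fun r => r) := by
  induction ks generalizing d with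
  | nil => exact absurd h List.not_mem_nil
  | cons k ks ih =>
    rw [List.nodup_cons] at hnd
    rw [List.foldl_cons]
    by_cases hck : c = k
    · subst hck
      rw [fold_sort_getD_not_mem _ _ _ hnd.1, PySem.Dict.getD_modify_self]
    · rcases List.mem_cons.mp h with h' | h'
      · exact absurd h' hck
      · rw [ih _ hnd.2 h', PySem.Dict.getD_modify_of_ne _ _ _ hck]

theorem set_update_of_subset (xs : List String) (s : PySem.Set String)
    (h : ∀ x ∈ xs, x ∈ s) : PySem.Set.update s xs = s := by
  induction xs generalizing s with
  | nil => rfl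
  | cons x xs ih =>
    have hadd : PySem.Set.add s x = s := by
      have hx : x ∈ s := h x List.mem_cons_self
      simp [PySem.Set.add, hx]
    show PySem.Set.update (PySem.Set.add s x) xs = s
    rw [hadd]
    exact ih s (fun y hy => h y (List.mem_cons_of_mem _ hy))

theorem fold_sort_keys (ks : List String) (d : PySem.Dict String (List Int))
    (h : ∀ k ∈ ks, k ∈ d.keys) :
    (ks.foldl (fun d c' => d.modify c' [] (fun rs => PySem.List.sorted rs (fun r => r))) d).keys
      = d.keys := by
  rw [PySem.Dict.keys_foldl_modify_key ks (fun c => c) [] (fun _ _ rs => PySem.List.sorted rs (fun r => r))]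
  rw [List.map_id']
  exact set_update_of_subset ks d.keys h

theorem foldl_two (g : String → String) (ks : List String) (a b : List String) :
    ks.foldl (fun st c => (st.1 ++ [c], st.2 ++ [g c])) (a, b) = (a ++ ks, b ++ ks.map g) := by
  induction ks generalizing a b with
  | nil => simp
  | cons k ks ih => simp [ih]

theorem A_eq_canon (l : List (String × Int)) : generate_fixed_positions l = gfpCanon l := by
  unfold generate_fixed_positions gfpCanon
  dsimp only
  rw [fold_sort_keys _ _ (fun k hk => hk), dict_keys, foldl_two]
  simp only [List.nil_append]
  have hchains : PySem.List.sorted (PySem.Set.ofList (l.map Prod.fst)) (fun k => k) = gfpChains l := rfl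
  rw [hchains]
  have hmap : ∀ c ∈ gfpChains l,
      PySem.Str.join " "
        ((((PySem.Set.ofList (l.map Prod.fst) : List String).foldl
              (fun d c' => d.modify c' [] (fun rs => PySem.List.sorted rs (fun r => r)))
              (l.foldl (fun d p => d.modify p.1 [] (fun rs => rs ++ [p.2]))
                PySem.Dict.empty)).getD c []).map PySem.Int.toStr)
      = gfpPart l c := by
    intro c hc
    have hmem : c ∈ PySem.Set.ofList (l.map Prod.fst) :=
      (PySem.List.mem_sorted _ _ _ _).mp hc
    rw [fold_sort_getD_mem _ _ _ (PySem.Set.nodup_ofList _) hmem, dict_getD]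
    rfl
  rw [List.map_congr_left hmap]

-- ===== B reduces to the normal form =====

theorem join_cons_cons (a b : String) (xs : List String) :
    PySem.Str.join " " (a :: b :: xs) = a ++ " " ++ PySem.Str.join " " (b :: xs) := by
  apply String.toList_inj.mp
  simp [PySem.Str.toList_join, String.toList_append, PySem.Chars.join,
    List.intercalate]

theorem join_head_append (p q : String) (xs : List String) :
    PySem.Str.join " " ((p ++ q) :: xs) = p ++ PySem.Str.join " " (q :: xs) := by
  apply String.toList_inj.mp
  cases xs <;>
    simp [PySem.Str.toList_join, String.toList_append, PySem.Chars.join,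
      List.intercalate, List.append_assoc]

theorem foldl_join (xs : List String) (a : String) :
    xs.foldl (fun acc x => acc ++ " " ++ x) a = PySem.Str.join " " (a :: xs) := by
  induction xs generalizing a with
  | nil =>
    apply String.toList_inj.mp
    simp [PySem.Str.toList_join, PySem.Chars.join, List.intercalate]
  | cons x xs ih =>
    rw [join_cons_cons, List.foldl_cons, ih (a ++ " " ++ x)]
    exact join_head_append (a ++ " ") x xs

theorem gfpStep_first (cs' qs' : List String) (c : String) (r : Int)
    (hlen : cs'.length = qs'.length) (hhd : cs'.head? ≠ some c) :
    gfpStep (cs', qs') (c, r) = (c :: cs', PySem.Int.toStr r :: qs') := by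
  cases cs' with
  | nil =>
    cases qs' with
    | nil => rfl
    | cons q qs => simp at hlen
  | cons c0 cs0 =>
    cases qs' with
    | nil => simp at hlen
    | cons q qs =>
      have : ¬ c0 = c := by
        intro h
        exact hhd (by rw [h]; rfl)
      simp [gfpStep, this]

theorem gfpStep_block (rs : List Int) (c : String) (cs0 qs0 : List String) (q : String) :
    ((rs.map (fun r => (c, r))).foldl gfpStep (c :: cs0, q :: qs0))
      = (c :: cs0, (rs.foldl (fun acc r => acc ++ " " ++ PySem.Int.toStr r) q) :: qs0) := by
  induction rs generalizing q with
  | nil => rfl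
  | cons r rs ih =>
    rw [List.map_cons, List.foldl_cons]
    show ((rs.map (fun r => (c, r))).foldl gfpStep (gfpStep (c :: cs0, q :: qs0) (c, r))) = _
    have : gfpStep (c :: cs0, q :: qs0) (c, r) = (c :: cs0, (q ++ " " ++ PySem.Int.toStr r) :: qs0) := by
      simp [gfpStep]
    rw [this, ih, List.foldl_cons]

theorem foldl_join_int (rs : List Int) (q : String) :
    rs.foldl (fun acc r => acc ++ " " ++ PySem.Int.toStr r) q
      = PySem.Str.join " " (q :: rs.map PySem.Int.toStr) := by
  rw [← foldl_join (rs.map PySem.Int.toStr) q, List.foldl_map]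

theorem fold_gfpStep_blocks (l : List (String × Int)) (cs cs' qs' : List String)
    (hne : ∀ c ∈ cs, gfpRes l c ≠ [])
    (hchain : List.IsChain (· ≠ ·) cs)
    (hhd : ∀ a, cs.head? = some a → cs'.head? ≠ some a)
    (hlen : cs'.length = qs'.length) :
    ((cs.flatMap (fun c => (gfpRes l c).map (fun r => (c, r)))).foldl gfpStep (cs', qs'))
      = (cs.reverse ++ cs', (cs.map (gfpPart l)).reverse ++ qs') := by
  induction cs generalizing cs' qs' with
  | nil => simp
  | cons c cs ih =>
    rw [List.flatMap_cons, List.foldl_append]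
    obtain ⟨r, rs, hrs⟩ : ∃ r rs, gfpRes l c = r :: rs := by
      cases h : gfpRes l c with
      | nil => exact absurd h (hne c List.mem_cons_self)
      | cons r rs => exact ⟨r, rs, rfl⟩
    have hpart : PySem.Str.join " " (PySem.Int.toStr r :: rs.map PySem.Int.toStr) = gfpPart l c := by
      unfold gfpPart
      rw [hrs, List.map_cons]
    rw [hrs, List.map_cons, List.foldl_cons,
      gfpStep_first cs' qs' c r hlen (hhd c rfl),
      gfpStep_block, foldl_join_int, hpart,
      ih (c :: cs') (gfpPart l c :: qs')
        (fun c' hc' => hne c' (List.mem_cons_of_mem _ hc'))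
        (by
          cases cs with
          | nil => exact List.isChain_nil
          | cons b t => exact (List.isChain_cons_cons.mp hchain).2)
        (fun a ha hsome => by
          cases cs with
          | nil => simp at ha
          | cons b t =>
            cases ha
            have hcb : c ≠ a := (List.isChain_cons_cons.mp hchain).1
            exact hcb (Option.some.inj hsome))
        (by simpa using hlen)]
    simp

theorem B_eq_canon (l : List (String × Int)) : generate_fixed_positions_alt l = gfpCanon l := by
  unfold generate_fixed_positions_alt gfpCanon
  dsimp only
  rw [sorted2_eq_gfpFlat]
  unfold gfpFlat
  rw [fold_gfpStep_blocks l (gfpChains l) [] []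
    (fun c hc => ?hne) ?hchain (fun a _ hb => by simp at hb) rfl]
  · simp
  case hne =>
    rcases List.mem_map.mp ((mem_gfpChains l c).mp hc) with ⟨p, hp, rfl⟩
    unfold gfpRes
    rw [Ne, PySem.List.sorted_eq_nil_iff]
    intro hnil
    have : p ∈ l.filter (fun q => q.1 == p.1) := List.mem_filter.mpr ⟨hp, by simp⟩
    rw [List.map_eq_nil_iff.mp hnil] at this
    exact List.not_mem_nil this
  case hchain =>
    exact List.Pairwise.isChain
      ((PySem.List.sorted_ofList_pairwise_lt _).imp (fun h => ne_of_lt h))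

-- ===== VERDICT (by name: the statement is the Claim_ definition above) =====
theorem generate_fixed_positions_spec : Claim_equal_generate_fixed_positions := by
  intro l _
  unfold Spec_generate_fixed_positions
  rw [A_eq_canon, B_eq_canon]
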